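-- pv_equiv track=rewrite | github.com/simonjohansson/aoc2025 | day4.py | _part2
-- ===== SOURCE A (Python) =====
-- from itertools import chain
--
-- def find_papers(positions):
--     return filter(lambda x: x[2] == "@", positions)
--
-- def find_adjacent_positions(pos, max_rows, max_cols):
--     x = pos[0]
--     y = pos[1]
--
--     return filter(
--         lambda adjacent: (adjacent[0] >= 0 and adjacent[1] >= 0) and adjacent[0] <= max_cols and adjacent[
--             1] <= max_rows,
--         [
--             # Above
--             (x - 1, y - 1),
--             (x, y - 1),
--             (x + 1, y - 1),
--
--             # Next to
--             (x - 1, y),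
--             (x + 1, y),
--
--             # Below
--             (x - 1, y + 1),
--             (x, y + 1),
--             (x + 1, y + 1),
--         ]
--     )
--
-- def find_adjecant_papers(pos, grid, max_rows, max_cols):
--     return find_papers(
--         [grid[adjacent[0]][adjacent[1]] for adjacent in find_adjacent_positions(pos, max_rows, max_cols)])
--
-- def find_acceccible(grid, max_rows, max_cols):
--     canddiates = [
--         (paper, list(find_adjecant_papers(paper, grid, max_rows, max_cols)))
--         for paper in find_papers(chain.from_iterable(grid))
--     ]
--     return filter(lambda c: len(c[1])< 4, canddiates)
--
-- def _part2(grid, max_rows, max_cols, removed=[]):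
--     removable = list(find_acceccible(grid, max_rows, max_cols))
--     if len(list(removable)) == 0:
--         return removed
--
--     new_grid = grid
--     for (pos, _) in removable:
--         new_grid[pos[0]][pos[1]] = (pos[0], pos[1], "x")
--
--     return _part2(new_grid, max_rows, max_cols, removed+removable)
-- ===== SOURCE B (Python) =====
-- # B: iterative round-based peeling over an ordered list of alive paper coordinates with a
-- # hash-set membership test, instead of A's recursion that mutates and rescans the whole grid
-- # each round. (A mutates `grid` in place; B does not — the equivalence is about the return value.)
-- OFFSETS = ((-1, -1), (0, -1), (1, -1), (-1, 0), (1, 0), (-1, 1), (0, 1), (1, 1))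
--
-- def _part2(grid, max_rows, max_cols, removed=[]):
--     alive = [(c[0], c[1]) for row in grid for c in row if c[2] == "@"]
--     out = list(removed)
--     while alive:
--         alive_set = set(alive)
--         this_round = []
--         survivors = []
--         for (x, y) in alive:
--             ns = [(x + dx, y + dy) for (dx, dy) in OFFSETS
--                   if 0 <= x + dx <= max_cols and 0 <= y + dy <= max_rows
--                   and (x + dx, y + dy) in alive_set]
--             if len(ns) < 4:
--                 this_round.append(((x, y, "@"), [(a, b, "@") for (a, b) in ns]))
--             else:
--                 survivors.append((x, y))
--         if not this_round:
--             break
--         out.extend(this_round)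
--         alive = survivors
--     return out
-- ===== Notes on version B (the rewrite author's own statement) =====
-- stated objective: alternative
-- what changed: B replaces A's recursion that mutates the grid in place and rescans every grid cell each round with an iterative loop over an ordered list of alive paper coordinates (hash-set membership for neighbour tests), splitting it into removed/survivors per round and never touching the grid after one initial pass.
-- outside the precondition, e.g. on _part2([[(5, 5, '@')]], 0, 0, []): A raises IndexError, B returns [((5, 5, '@'), [])]; on _part2([[(0, 0, '@')]], 1, 0, []): A raises IndexError, B returns [((0, 0, '@'), [])]
import Mathlib
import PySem

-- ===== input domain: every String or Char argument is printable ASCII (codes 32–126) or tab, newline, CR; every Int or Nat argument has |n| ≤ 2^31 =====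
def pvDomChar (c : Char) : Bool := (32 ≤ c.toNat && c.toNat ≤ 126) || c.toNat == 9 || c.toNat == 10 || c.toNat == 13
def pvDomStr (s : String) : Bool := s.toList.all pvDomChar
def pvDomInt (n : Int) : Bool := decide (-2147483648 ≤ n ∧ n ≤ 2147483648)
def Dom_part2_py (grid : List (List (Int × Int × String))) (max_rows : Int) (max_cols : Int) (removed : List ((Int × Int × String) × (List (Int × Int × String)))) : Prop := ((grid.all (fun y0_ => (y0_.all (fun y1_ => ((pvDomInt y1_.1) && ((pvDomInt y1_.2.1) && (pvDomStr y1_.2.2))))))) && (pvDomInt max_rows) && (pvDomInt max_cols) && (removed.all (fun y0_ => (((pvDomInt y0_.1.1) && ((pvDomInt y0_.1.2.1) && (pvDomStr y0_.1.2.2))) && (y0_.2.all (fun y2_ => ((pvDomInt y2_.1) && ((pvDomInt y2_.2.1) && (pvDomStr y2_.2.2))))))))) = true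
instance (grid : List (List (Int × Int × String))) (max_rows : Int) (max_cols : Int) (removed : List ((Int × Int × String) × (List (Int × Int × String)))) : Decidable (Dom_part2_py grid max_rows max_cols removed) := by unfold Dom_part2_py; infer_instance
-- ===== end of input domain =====

-- ===== PORT A =====
-- One honest line: B peels papers iteratively over an ordered list of alive paper coordinates with a set
-- membership test instead of A's recursion that mutates the grid in place and rescans all cells each round
-- (Python A mutates `grid`; B does not — the equivalence proved is about the return value).
-- Python raises IndexError for grid[a][b] out of range; the port uses pyGetD/pySetD defaults there — such inputs are excluded by Pre_part2_py.
def findPapersA (positions : List (Int × Int × String)) : List (Int × Int × String) :=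
  positions.filter (fun x => x.2.2 == "@")

def findAdjacentPositionsA (pos : Int × Int × String) (max_rows max_cols : Int) : List (Int × Int) :=
  ([(pos.1 - 1, pos.2.1 - 1), (pos.1, pos.2.1 - 1), (pos.1 + 1, pos.2.1 - 1),
    (pos.1 - 1, pos.2.1), (pos.1 + 1, pos.2.1),
    (pos.1 - 1, pos.2.1 + 1), (pos.1, pos.2.1 + 1), (pos.1 + 1, pos.2.1 + 1)] : List (Int × Int)).filter
    (fun a => (decide (0 ≤ a.1) && decide (0 ≤ a.2)) && decide (a.1 ≤ max_cols) && decide (a.2 ≤ max_rows))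

def cellA (grid : List (List (Int × Int × String))) (a : Int × Int) : Int × Int × String :=
  PySem.List.pyGetD (PySem.List.pyGetD grid a.1 []) a.2 (0, 0, "")

def findAdjecantPapersA (pos : Int × Int × String) (grid : List (List (Int × Int × String)))
    (max_rows max_cols : Int) : List (Int × Int × String) :=
  findPapersA ((findAdjacentPositionsA pos max_rows max_cols).map (cellA grid))

def findAcceccibleA (grid : List (List (Int × Int × String))) (max_rows max_cols : Int) :
    List ((Int × Int × String) × List (Int × Int × String)) :=
  ((findPapersA grid.flatten).map
      (fun paper => (paper, findAdjecantPapersA paper grid max_rows max_cols))).filter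
    (fun c => decide (c.2.length < 4))

-- new_grid[pos[0]][pos[1]] = (pos[0], pos[1], "x")
def markA (g : List (List (Int × Int × String)))
    (e : (Int × Int × String) × List (Int × Int × String)) : List (List (Int × Int × String)) :=
  PySem.List.pySetD g e.1.1
    (PySem.List.pySetD (PySem.List.pyGetD g e.1.1 []) e.1.2.1 (e.1.1, e.1.2.1, "x"))

-- the recursion of _part2; fuel (#papers + 1) only makes the recursion total (Python recurses while removable ≠ [])
def part2GoA : Nat → List (List (Int × Int × String)) → Int → Int →
    List ((Int × Int × String) × (List (Int × Int × String))) →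
    List ((Int × Int × String) × (List (Int × Int × String)))
  | 0, _, _, _, removed => removed
  | fuel + 1, grid, max_rows, max_cols, removed =>
    let removable := findAcceccibleA grid max_rows max_cols
    if removable.length = 0 then removed
    else part2GoA fuel (removable.foldl markA grid) max_rows max_cols (removed ++ removable)

def part2_py (grid : List (List (Int × Int × String))) (max_rows : Int) (max_cols : Int) (removed : List ((Int × Int × String) × (List (Int × Int × String)))) : List ((Int × Int × String) × (List (Int × Int × String))) :=
  part2GoA ((findPapersA grid.flatten).length + 1) grid max_rows max_cols removed

-- ===== PORT B =====
def offsetsB : List (Int × Int) := [(-1, -1), (0, -1), (1, -1), (-1, 0), (1, 0), (-1, 1), (0, 1), (1, 1)]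

def nbrsB (max_rows max_cols : Int) (aliveSet : PySem.Set (Int × Int)) (x y : Int) : List (Int × Int) :=
  (offsetsB.map (fun d => (x + d.1, y + d.2))).filter
    (fun q => decide (0 ≤ q.1) && decide (q.1 ≤ max_cols) && decide (0 ≤ q.2) && decide (q.2 ≤ max_rows)
      && PySem.Set.contains aliveSet q)

-- one pass over `alive`: (this_round, survivors)
def roundSplitB (max_rows max_cols : Int) (aliveSet : PySem.Set (Int × Int)) :
    List (Int × Int) → List ((Int × Int × String) × List (Int × Int × String)) × List (Int × Int)
  | [] => ([], [])
  | p :: rest =>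
    let ns := nbrsB max_rows max_cols aliveSet p.1 p.2
    let r := roundSplitB max_rows max_cols aliveSet rest
    if ns.length < 4 then (((p.1, p.2, "@"), ns.map (fun q => (q.1, q.2, "@"))) :: r.1, r.2)
    else (r.1, p :: r.2)

-- needed by part2GoB's termination (survivors are strictly fewer when this_round ≠ [])
lemma roundSplitB_length (max_rows max_cols : Int) (s : PySem.Set (Int × Int)) (l : List (Int × Int)) :
    (roundSplitB max_rows max_cols s l).1.length + (roundSplitB max_rows max_cols s l).2.length = l.length := by
  induction l with
  | nil => simp [roundSplitB]
  | cons p rest ih =>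
    simp only [roundSplitB]
    split <;> simp <;> omega

def part2GoB (max_rows max_cols : Int) (alive : List (Int × Int))
    (out : List ((Int × Int × String) × (List (Int × Int × String)))) :
    List ((Int × Int × String) × (List (Int × Int × String))) :=
  if alive = [] then out
  else
    let r := roundSplitB max_rows max_cols (PySem.Set.ofList alive) alive
    if h : r.1 = [] then out
    else part2GoB max_rows max_cols r.2 (out ++ r.1)
termination_by alive.length
decreasing_by
  have hl := roundSplitB_length max_rows max_cols (PySem.Set.ofList alive) alive
  have h1 : 0 < (roundSplitB max_rows max_cols (PySem.Set.ofList alive) alive).1.length :=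
    List.length_pos_iff.mpr h
  show (roundSplitB max_rows max_cols (PySem.Set.ofList alive) alive).2.length < alive.length
  omega

def part2_py_alt (grid : List (List (Int × Int × String))) (max_rows : Int) (max_cols : Int) (removed : List ((Int × Int × String) × (List (Int × Int × String)))) : List ((Int × Int × String) × (List (Int × Int × String))) :=
  part2GoB max_rows max_cols
    ((grid.flatten.filter (fun c => c.2.2 == "@")).map (fun c => (c.1, c.2.1))) removed

-- ===== PRECONDITION & SPEC =====
-- Pre_ admits paper-free grids (both programs return `removed` untouched) and coordinate-consistent
-- (max_cols+1)×(max_rows+1) rectangles; it excludes grids with an "@"-cell whose stored coordinates do not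
-- name its own position (or that overrun the stated bounds): there A indexes by the stored coordinates and
-- either raises IndexError, recurses forever (it un-marks a cell other than the scanned paper), or returns
-- a list naming neighbour cells by their stored values where B names them by their grid position.
def Pre_part2_py (grid : List (List (Int × Int × String))) (max_rows : Int) (max_cols : Int) (removed : List ((Int × Int × String) × (List (Int × Int × String)))) : Prop :=
  (∀ row ∈ grid, ∀ c ∈ row, ¬ c.2.2 = "@") ∨
  ((grid.length : Int) = max_cols + 1 ∧
   (∀ row ∈ grid, (row.length : Int) = max_rows + 1) ∧
   (∀ rp ∈ grid.zipIdx, ∀ cp ∈ rp.1.zipIdx, cp.1.1 = (rp.2 : Int) ∧ cp.1.2.1 = (cp.2 : Int)))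
instance (grid : List (List (Int × Int × String))) (max_rows : Int) (max_cols : Int) (removed : List ((Int × Int × String) × (List (Int × Int × String)))) : Decidable (Pre_part2_py grid max_rows max_cols removed) := by unfold Pre_part2_py; infer_instance

def pvWitness_part2_py : (List (List (Int × Int × String))) × Int × Int × (List ((Int × Int × String) × (List (Int × Int × String)))) :=
  ([[(0, 0, "@"), (0, 1, ".")], [(1, 0, "@"), (1, 1, "@")]], 1, 1, [])

def Spec_part2_py (grid : List (List (Int × Int × String))) (max_rows : Int) (max_cols : Int) (removed : List ((Int × Int × String) × (List (Int × Int × String)))) (out : List ((Int × Int × String) × (List (Int × Int × String)))) : Prop := out = part2_py_alt grid max_rows max_cols removed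
instance (grid : List (List (Int × Int × String))) (max_rows : Int) (max_cols : Int) (removed : List ((Int × Int × String) × (List (Int × Int × String)))) (out : List ((Int × Int × String) × (List (Int × Int × String)))) : Decidable (Spec_part2_py grid max_rows max_cols removed out) := by unfold Spec_part2_py; infer_instance

-- ===== CLAIM (what is proved, stated in full; the proofs are below) =====
def Claim_equal_part2_py : Prop := ∀ (grid : List (List (Int × Int × String))) (max_rows : Int) (max_cols : Int) (removed : List ((Int × Int × String) × (List (Int × Int × String)))), Dom_part2_py grid max_rows max_cols removed → Pre_part2_py grid max_rows max_cols removed → Spec_part2_py grid max_rows max_cols removed (part2_py grid max_rows max_cols removed)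

-- ===== LEMMAS AND PROOFS =====

-- the canonical grid determined by bounds and a string field F
def mkGrid (max_rows max_cols : Int) (F : Int × Int → String) : List (List (Int × Int × String)) :=
  (PySem.List.pyRange 0 (max_cols + 1) 1).map (fun i =>
    (PySem.List.pyRange 0 (max_rows + 1) 1).map (fun j => (i, j, F (i, j))))

def allIdx (max_rows max_cols : Int) : List (Int × Int) :=
  (PySem.List.pyRange 0 (max_cols + 1) 1).flatMap (fun i =>
    (PySem.List.pyRange 0 (max_rows + 1) 1).map (fun j => (i, j)))

def inB (max_rows max_cols : Int) (q : Int × Int) : Prop :=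
  0 ≤ q.1 ∧ q.1 ≤ max_cols ∧ 0 ≤ q.2 ∧ q.2 ≤ max_rows

def aliveOf (max_rows max_cols : Int) (F : Int × Int → String) : List (Int × Int) :=
  (allIdx max_rows max_cols).filter (fun q => F q == "@")

lemma mem_allIdx (max_rows max_cols : Int) (q : Int × Int) :
    q ∈ allIdx max_rows max_cols ↔ inB max_rows max_cols q := by
  obtain ⟨a, b⟩ := q
  simp only [allIdx, inB, List.mem_flatMap, List.mem_map, PySem.List.mem_pyRange_one]
  constructor
  · rintro ⟨i, hi, j, hj, hq⟩
    injection hq with h1 h2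
    subst h1; subst h2
    exact ⟨by omega, by omega, by omega, by omega⟩
  · rintro ⟨h1, h2, h3, h4⟩
    exact ⟨a, by omega, b, by omega, rfl⟩

lemma mem_aliveOf (max_rows max_cols : Int) (F : Int × Int → String) (q : Int × Int) :
    q ∈ aliveOf max_rows max_cols F ↔ (inB max_rows max_cols q ∧ F q = "@") := by
  simp [aliveOf, List.mem_filter, mem_allIdx]

lemma flatten_mkGrid (max_rows max_cols : Int) (F : Int × Int → String) :
    (mkGrid max_rows max_cols F).flatten = (allIdx max_rows max_cols).map (fun q => (q.1, q.2, F q)) := by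
  rw [mkGrid, allIdx, List.flatMap_def, List.map_flatten, List.map_map]
  exact congrArg List.flatten (by simp [Function.comp, List.map_map])

lemma cellA_mkGrid (max_rows max_cols : Int) (F : Int × Int → String) (q : Int × Int)
    (h : inB max_rows max_cols q) : cellA (mkGrid max_rows max_cols F) q = (q.1, q.2, F q) := by
  obtain ⟨h1, h2, h3, h4⟩ := h
  rw [cellA, mkGrid,
    PySem.List.pyGetD_map_pyRange_of_nonneg _ _ _ _ h1 (by omega),
    PySem.List.pyGetD_map_pyRange_of_nonneg _ _ _ _ h3 (by omega)]

lemma set_map_pyRange {α : Type} (n : Int) (f : Int → α) (k : Int) (v : α)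
    (h0 : 0 ≤ k) (h1 : k < n) :
    ((PySem.List.pyRange 0 n 1).map f).set k.toNat v =
      (PySem.List.pyRange 0 n 1).map (fun i => if i = k then v else f i) := by
  apply List.ext_getElem
  · simp
  · intro i hi1 hi2
    simp only [List.getElem_set, List.getElem_map]
    have hlen : i < (PySem.List.pyRange 0 n 1).length := by simpa using hi2
    have hg : (PySem.List.pyRange 0 n 1)[i] = 0 + (i : Int) := PySem.List.getElem_pyRange_one 0 n i hlen
    by_cases hik : k.toNat = i
    · rw [if_pos hik, hg, if_pos (by omega)]
    · rw [if_neg hik, hg]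
      have hne : ¬ ((0 : Int) + (i : Int) = k) := by omega
      rw [if_neg hne]

lemma markA_mkGrid (max_rows max_cols : Int) (F : Int × Int → String)
    (e : (Int × Int × String) × List (Int × Int × String)) (h : inB max_rows max_cols (e.1.1, e.1.2.1)) :
    markA (mkGrid max_rows max_cols F) e =
      mkGrid max_rows max_cols (fun r => if r = (e.1.1, e.1.2.1) then "x" else F r) := by
  obtain ⟨h1, h2, h3, h4⟩ := h
  rw [markA, mkGrid, PySem.List.pyGetD_map_pyRange_of_nonneg _ _ _ _ h1 (by omega),
    PySem.List.pySetD_of_nonneg _ _ h3, set_map_pyRange _ _ _ _ h3 (by omega),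
    PySem.List.pySetD_of_nonneg _ _ h1, set_map_pyRange _ _ _ _ h1 (by omega), mkGrid]
  apply List.map_congr_left
  intro i _
  by_cases hie : i = e.1.1
  · rw [if_pos hie]
    subst hie
    apply List.map_congr_left
    intro j _
    by_cases hje : j = e.1.2.1
    · subst hje
      simp
    · simp [hje, Prod.ext_iff]
  · rw [if_neg hie]
    apply List.map_congr_left
    intro j _
    simp [hie, Prod.ext_iff]

lemma foldl_markA (max_rows max_cols : Int) (F : Int × Int → String)
    (L : List ((Int × Int × String) × List (Int × Int × String)))
    (h : ∀ e ∈ L, inB max_rows max_cols (e.1.1, e.1.2.1)) :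
    L.foldl markA (mkGrid max_rows max_cols F) =
      mkGrid max_rows max_cols (fun r => if r ∈ L.map (fun e => (e.1.1, e.1.2.1)) then "x" else F r) := by
  induction L generalizing F with
  | nil => simp [mkGrid]
  | cons e L ih =>
    rw [List.foldl_cons, markA_mkGrid max_rows max_cols F e (h e List.mem_cons_self),
      ih _ (fun e' he' => h e' (List.mem_cons_of_mem _ he'))]
    unfold mkGrid
    apply List.map_congr_left
    intro i _
    apply List.map_congr_left
    intro j _
    by_cases hm : (i, j) ∈ L.map (fun e => (e.1.1, e.1.2.1)) <;>
      by_cases heq : (i, j) = (e.1.1, e.1.2.1) <;>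
      simp [hm, heq]

lemma papers_mkGrid (max_rows max_cols : Int) (F : Int × Int → String) :
    findPapersA (mkGrid max_rows max_cols F).flatten =
      (aliveOf max_rows max_cols F).map (fun q => (q.1, q.2, "@")) := by
  rw [findPapersA, flatten_mkGrid, List.filter_map]
  have hcomp : ((fun x : Int × Int × String => x.2.2 == "@") ∘ fun q : Int × Int => (q.1, q.2, F q)) =
      fun q : Int × Int => F q == "@" := rfl
  rw [hcomp]
  apply List.map_congr_left
  intro q hq
  have hf : F q = "@" := by simpa using List.of_mem_filter hq
  simp [hf]

lemma contains_alive (max_rows max_cols : Int) (F : Int × Int → String) (q : Int × Int) :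
    PySem.Set.contains (PySem.Set.ofList (aliveOf max_rows max_cols F)) q = true ↔
      (inB max_rows max_cols q ∧ F q = "@") := by
  rw [PySem.Set.contains_iff, PySem.Set.mem_ofList, mem_aliveOf]

lemma nbrs_eq (max_rows max_cols : Int) (F : Int × Int → String) (x y : Int) :
    findAdjecantPapersA (x, y, "@") (mkGrid max_rows max_cols F) max_rows max_cols =
      (nbrsB max_rows max_cols (PySem.Set.ofList (aliveOf max_rows max_cols F)) x y).map
        (fun q => (q.1, q.2, "@")) := by
  have hofs : (offsetsB.map (fun d => (x + d.1, y + d.2))) =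
      ([(x - 1, y - 1), (x, y - 1), (x + 1, y - 1), (x - 1, y), (x + 1, y),
        (x - 1, y + 1), (x, y + 1), (x + 1, y + 1)] : List (Int × Int)) := by
    simp only [offsetsB, List.map_cons, List.map_nil]
    norm_num
    omega
  have hpos : findAdjacentPositionsA (x, y, "@") max_rows max_cols =
      ([(x - 1, y - 1), (x, y - 1), (x + 1, y - 1), (x - 1, y), (x + 1, y),
        (x - 1, y + 1), (x, y + 1), (x + 1, y + 1)] : List (Int × Int)).filter
        (fun a => (decide (0 ≤ a.1) && decide (0 ≤ a.2)) && decide (a.1 ≤ max_cols) && decide (a.2 ≤ max_rows)) := rfl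
  rw [findAdjecantPapersA, hpos, findPapersA, nbrsB, hofs, List.filter_map, List.filter_filter]
  have hpred : ∀ a : Int × Int,
      (((fun x : Int × Int × String => x.2.2 == "@") ∘ cellA (mkGrid max_rows max_cols F)) a &&
        ((decide (0 ≤ a.1) && decide (0 ≤ a.2)) && decide (a.1 ≤ max_cols) && decide (a.2 ≤ max_rows))) =
      ((decide (0 ≤ a.1) && decide (a.1 ≤ max_cols) && decide (0 ≤ a.2) && decide (a.2 ≤ max_rows)) &&
        PySem.Set.contains (PySem.Set.ofList (aliveOf max_rows max_cols F)) a) := by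
    intro a
    rw [Bool.eq_iff_iff]
    by_cases hb : inB max_rows max_cols a
    · obtain ⟨c1, c2, c3, c4⟩ := hb
      simp [Function.comp, cellA_mkGrid max_rows max_cols F a ⟨c1, c2, c3, c4⟩,
        mem_aliveOf, inB, c1, c2, c3, c4]
    · simp only [Bool.and_eq_true, decide_eq_true_eq, Function.comp, beq_iff_eq, contains_alive]
      simp only [inB, not_and_or] at hb
      constructor <;> intro hh <;> exfalso <;> rcases hb with h | h | h | h <;> tauto
  rw [List.filter_congr (fun a _ => hpred a)]
  apply List.map_congr_left
  intro a ha
  obtain ⟨-, hpa⟩ := List.mem_filter.mp ha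
  rw [Bool.and_eq_true] at hpa
  obtain ⟨hb, hf⟩ := (contains_alive max_rows max_cols F a).mp hpa.2
  rw [cellA_mkGrid max_rows max_cols F a hb, hf]

def condB (max_rows max_cols : Int) (s : PySem.Set (Int × Int)) (p : Int × Int) : Bool :=
  decide ((nbrsB max_rows max_cols s p.1 p.2).length < 4)

lemma roundSplitB_eq (max_rows max_cols : Int) (s : PySem.Set (Int × Int)) (l : List (Int × Int)) :
    roundSplitB max_rows max_cols s l =
      ((l.filter (condB max_rows max_cols s)).map
          (fun p => ((p.1, p.2, "@"), (nbrsB max_rows max_cols s p.1 p.2).map (fun q => (q.1, q.2, "@")))),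
        l.filter (fun p => ! condB max_rows max_cols s p)) := by
  induction l with
  | nil => simp [roundSplitB]
  | cons p rest ih =>
    simp only [roundSplitB, ih, condB]
    by_cases hc : (nbrsB max_rows max_cols s p.1 p.2).length < 4 <;>
      simp [condB, hc]

lemma removable_mkGrid (max_rows max_cols : Int) (F : Int × Int → String) :
    findAcceccibleA (mkGrid max_rows max_cols F) max_rows max_cols =
      (roundSplitB max_rows max_cols (PySem.Set.ofList (aliveOf max_rows max_cols F))
        (aliveOf max_rows max_cols F)).1 := by
  rw [findAcceccibleA, papers_mkGrid, roundSplitB_eq, List.map_map]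
  have hmap : ∀ q ∈ aliveOf max_rows max_cols F,
      ((fun paper => (paper, findAdjecantPapersA paper (mkGrid max_rows max_cols F) max_rows max_cols)) ∘
        (fun q : Int × Int => (q.1, q.2, "@"))) q =
      (fun q : Int × Int => ((q.1, q.2, "@"),
        (nbrsB max_rows max_cols (PySem.Set.ofList (aliveOf max_rows max_cols F)) q.1 q.2).map
          (fun r => (r.1, r.2, "@")))) q := by
    intro q _
    simp only [Function.comp]
    rw [nbrs_eq]
  rw [List.map_congr_left hmap, List.filter_map]
  have hpred : ((fun c : ((Int × Int × String) × List (Int × Int × String)) => decide (c.2.length < 4)) ∘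
      (fun q : Int × Int => ((q.1, q.2, "@"),
        (nbrsB max_rows max_cols (PySem.Set.ofList (aliveOf max_rows max_cols F)) q.1 q.2).map
          (fun r => (r.1, r.2, "@"))))) =
      condB max_rows max_cols (PySem.Set.ofList (aliveOf max_rows max_cols F)) := by
    funext q
    simp [condB, Function.comp]
  rw [hpred]

lemma alive_after_gen (max_rows max_cols : Int) (F : Int × Int → String) (cond : (Int × Int) → Bool) :
    aliveOf max_rows max_cols
        (fun r => if r ∈ (aliveOf max_rows max_cols F).filter cond then "x" else F r) =
      (aliveOf max_rows max_cols F).filter (fun p => ! cond p) := by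
  show List.filter _ (allIdx max_rows max_cols) = _
  rw [show (aliveOf max_rows max_cols F).filter (fun p => ! cond p) =
      (allIdx max_rows max_cols).filter (fun p => (! cond p) && (F p == "@")) from List.filter_filter]
  apply List.filter_congr
  intro q hq
  by_cases h1 : F q = "@" <;> by_cases h2 : cond q = true
  · have : q ∈ (aliveOf max_rows max_cols F).filter cond :=
      List.mem_filter.mpr ⟨(mem_aliveOf max_rows max_cols F q).mpr ⟨(mem_allIdx max_rows max_cols q).mp hq, h1⟩, h2⟩
    simp [this, h1, h2]
  · have : q ∉ (aliveOf max_rows max_cols F).filter cond := fun hc => h2 (List.mem_filter.mp hc).2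
    simp [this, h1, h2]
  · have : q ∉ (aliveOf max_rows max_cols F).filter cond :=
      fun hc => h1 ((mem_aliveOf max_rows max_cols F q).mp (List.mem_filter.mp hc).1).2
    simp [this, h1, h2]
  · have : q ∉ (aliveOf max_rows max_cols F).filter cond :=
      fun hc => h1 ((mem_aliveOf max_rows max_cols F q).mp (List.mem_filter.mp hc).1).2
    simp [this, h1, h2]

lemma mem_zipIdx_self {α : Type} (l : List α) (i : Nat) (h : i < l.length) :
    (l[i], i) ∈ l.zipIdx := by
  have h2 : i < (l.zipIdx 0).length := by simp [h]
  have h3 := List.getElem_zipIdx (l := l) (j := 0) (i := i) h2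
  have h4 := List.getElem_mem h2
  rw [h3] at h4
  simpa using h4

lemma part2GoB_eq (max_rows max_cols : Int) (alive : List (Int × Int))
    (out : List ((Int × Int × String) × (List (Int × Int × String)))) :
    part2GoB max_rows max_cols alive out =
      if alive = [] then out
      else if (roundSplitB max_rows max_cols (PySem.Set.ofList alive) alive).1 = [] then out
      else part2GoB max_rows max_cols
        (roundSplitB max_rows max_cols (PySem.Set.ofList alive) alive).2
        (out ++ (roundSplitB max_rows max_cols (PySem.Set.ofList alive) alive).1) := by
  rw [part2GoB]
  by_cases h1 : alive = []
  · simp [h1]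
  · rw [if_neg h1, if_neg h1]
    show (if _h : (roundSplitB max_rows max_cols (PySem.Set.ofList alive) alive).1 = [] then out
      else part2GoB max_rows max_cols
        (roundSplitB max_rows max_cols (PySem.Set.ofList alive) alive).2
        (out ++ (roundSplitB max_rows max_cols (PySem.Set.ofList alive) alive).1)) = _
    by_cases h2 : (roundSplitB max_rows max_cols (PySem.Set.ofList alive) alive).1 = []
    · rw [dif_pos h2, if_pos h2]
    · rw [dif_neg h2, if_neg h2]

lemma part2GoA_eq (fuel : Nat) (grid : List (List (Int × Int × String))) (max_rows max_cols : Int)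
    (removed : List ((Int × Int × String) × (List (Int × Int × String)))) :
    part2GoA (fuel + 1) grid max_rows max_cols removed =
      if (findAcceccibleA grid max_rows max_cols).length = 0 then removed
      else part2GoA fuel ((findAcceccibleA grid max_rows max_cols).foldl markA grid) max_rows max_cols
        (removed ++ findAcceccibleA grid max_rows max_cols) := by
  rw [part2GoA]

lemma go_eq (max_rows max_cols : Int) : ∀ (fuel : Nat) (F : Int × Int → String)
    (removed : List ((Int × Int × String) × (List (Int × Int × String)))),
    (aliveOf max_rows max_cols F).length < fuel →
    part2GoA fuel (mkGrid max_rows max_cols F) max_rows max_cols removed =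
      part2GoB max_rows max_cols (aliveOf max_rows max_cols F) removed := by
  intro fuel
  induction fuel with
  | zero => intro F removed h; omega
  | succ n ih =>
    intro F removed h
    rw [part2GoA_eq, removable_mkGrid, part2GoB_eq]
    by_cases hr : (roundSplitB max_rows max_cols (PySem.Set.ofList (aliveOf max_rows max_cols F))
        (aliveOf max_rows max_cols F)).1 = []
    · rw [if_pos (show (roundSplitB max_rows max_cols (PySem.Set.ofList (aliveOf max_rows max_cols F))
        (aliveOf max_rows max_cols F)).1.length = 0 by rw [hr]; rfl)]
      simp [hr]
    · have hlen := roundSplitB_length max_rows max_cols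
        (PySem.Set.ofList (aliveOf max_rows max_cols F)) (aliveOf max_rows max_cols F)
      have hpos : 0 < (roundSplitB max_rows max_cols (PySem.Set.ofList (aliveOf max_rows max_cols F))
          (aliveOf max_rows max_cols F)).1.length := List.length_pos_iff.mpr hr
      have ha : ¬ aliveOf max_rows max_cols F = [] := fun hnil => hr (by rw [hnil]; simp [roundSplitB])
      have hne : ¬ ((roundSplitB max_rows max_cols (PySem.Set.ofList (aliveOf max_rows max_cols F))
          (aliveOf max_rows max_cols F)).1.length = 0) := by omega
      rw [if_neg hne, if_neg ha, if_neg hr]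
      have hcoords : ((roundSplitB max_rows max_cols (PySem.Set.ofList (aliveOf max_rows max_cols F))
          (aliveOf max_rows max_cols F)).1).map (fun e => (e.1.1, e.1.2.1)) =
          (aliveOf max_rows max_cols F).filter
            (condB max_rows max_cols (PySem.Set.ofList (aliveOf max_rows max_cols F))) := by
        rw [roundSplitB_eq, List.map_map]
        exact List.map_id _ ▸ rfl
      have hin : ∀ e ∈ (roundSplitB max_rows max_cols (PySem.Set.ofList (aliveOf max_rows max_cols F))
          (aliveOf max_rows max_cols F)).1, inB max_rows max_cols (e.1.1, e.1.2.1) := by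
        intro e he
        have hm : (e.1.1, e.1.2.1) ∈ (roundSplitB max_rows max_cols
            (PySem.Set.ofList (aliveOf max_rows max_cols F)) (aliveOf max_rows max_cols F)).1.map
            (fun e => (e.1.1, e.1.2.1)) := List.mem_map_of_mem he
        rw [hcoords] at hm
        exact ((mem_aliveOf max_rows max_cols F _).mp (List.mem_of_mem_filter hm)).1
      rw [foldl_markA max_rows max_cols F _ hin, hcoords]
      have hafter : aliveOf max_rows max_cols
          (fun r => if r ∈ (aliveOf max_rows max_cols F).filter
              (condB max_rows max_cols (PySem.Set.ofList (aliveOf max_rows max_cols F))) then "x" else F r) =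
          (roundSplitB max_rows max_cols (PySem.Set.ofList (aliveOf max_rows max_cols F))
            (aliveOf max_rows max_cols F)).2 := by
        rw [roundSplitB_eq, alive_after_gen]
      rw [ih _ _ (by rw [hafter]; omega), hafter]

lemma canon_grid (grid : List (List (Int × Int × String))) (max_rows max_cols : Int)
    (hlen : (grid.length : Int) = max_cols + 1)
    (hrow : ∀ row ∈ grid, (row.length : Int) = max_rows + 1)
    (hcoord : ∀ rp ∈ grid.zipIdx, ∀ cp ∈ rp.1.zipIdx, cp.1.1 = (rp.2 : Int) ∧ cp.1.2.1 = (cp.2 : Int)) :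
    grid = mkGrid max_rows max_cols (fun q => (cellA grid q).2.2) := by
  apply List.ext_getElem
  · simp [mkGrid, PySem.List.length_pyRange_one]
    omega
  · intro i hi1 hi2
    have hidx : i < (PySem.List.pyRange 0 (max_cols + 1) 1).length := by
      simpa [mkGrid] using hi2
    simp only [mkGrid]
    rw [List.getElem_map, PySem.List.getElem_pyRange_one 0 _ i hidx]
    have hrl : (grid[i].length : Int) = max_rows + 1 := hrow _ (List.getElem_mem hi1)
    apply List.ext_getElem
    · simp [PySem.List.length_pyRange_one]
      omega
    · intro j hj1 hj2
      have hjdx : j < (PySem.List.pyRange 0 (max_rows + 1) 1).length := by simpa using hj2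
      rw [List.getElem_map, PySem.List.getElem_pyRange_one 0 _ j hjdx]
      have hcell := hcoord _ (mem_zipIdx_self grid i hi1) _ (mem_zipIdx_self grid[i] j hj1)
      have hc : cellA grid ((0 : Int) + (i : Int), (0 : Int) + (j : Int)) = grid[i][j] := by
        rw [cellA]
        simp only [zero_add]
        rw [PySem.List.pyGetD_natCast grid i [], List.getD_eq_getElem _ _ hi1,
          PySem.List.pyGetD_natCast _ j _, List.getD_eq_getElem _ _ hj1]
      rw [hc]
      have e1 : grid[i][j].1 = (0 : Int) + (i : Int) := by
        rw [hcell.1]; omega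
      have e2 : grid[i][j].2.1 = (0 : Int) + (j : Int) := by
        rw [hcell.2]; omega
      calc grid[i][j] = (grid[i][j].1, grid[i][j].2.1, grid[i][j].2.2) := rfl
        _ = ((0 : Int) + (i : Int), (0 : Int) + (j : Int), grid[i][j].2.2) := by rw [e1, e2]

lemma alive_init (max_rows max_cols : Int) (F : Int × Int → String) :
    ((mkGrid max_rows max_cols F).flatten.filter (fun c => c.2.2 == "@")).map (fun c => (c.1, c.2.1)) =
      aliveOf max_rows max_cols F := by
  have : (mkGrid max_rows max_cols F).flatten.filter (fun c => c.2.2 == "@") =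
      findPapersA (mkGrid max_rows max_cols F).flatten := rfl
  rw [this, papers_mkGrid, List.map_map]
  have : ((fun c : Int × Int × String => (c.1, c.2.1)) ∘ (fun q : Int × Int => (q.1, q.2, "@"))) =
      id := by funext q; rfl
  rw [this, List.map_id]

-- ===== VERDICT (by name: the statement is the Claim_ definition above) =====
theorem part2_py_spec : Claim_equal_part2_py := by
  intro grid max_rows max_cols removed _hdom hpre
  unfold Spec_part2_py
  rcases hpre with hnop | ⟨hlen, hrow, hcoord⟩
  · -- no "@" cell anywhere: both sides return `removed` at once
    have hp : findPapersA grid.flatten = [] := by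
      rw [findPapersA, List.filter_eq_nil_iff]
      intro c hc
      obtain ⟨row, hrow', hcrow⟩ := List.mem_flatten.mp hc
      simpa using hnop row hrow' c hcrow
    rw [part2_py, part2_py_alt, hp,
      show grid.flatten.filter (fun c => c.2.2 == "@") = findPapersA grid.flatten from rfl, hp]
    rw [List.length_nil, part2GoA_eq, findAcceccibleA, hp, part2GoB_eq]
    simp
  · have hc := canon_grid grid max_rows max_cols hlen hrow hcoord
    rw [part2_py, part2_py_alt, hc, alive_init, papers_mkGrid, List.length_map]
    exact go_eq max_rows max_cols _ _ removed (Nat.lt_succ_self _)
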